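-- pv_equiv track=rewrite | github.com/kubegc/Datasets | TVM/models_component/merge.py | simple_list_to_str
-- ===== SOURCE A (Python) =====
-- def simple_list_to_str(data_list:list)->dict:
--     result={}
--     for value in data_list:
--         if str(value) not in result.keys():
--             result[str(value)] = 1
--         else:
--             result[str(value)] += 1
--
--     return result
-- ===== SOURCE B (Python) =====
-- def simple_list_to_str(data_list: list) -> dict:
--     keys = [str(v) for v in data_list]
--     runs = []  # (key, run length) for each run of equal keys, in sorted key order
--     for k in sorted(keys):
--         if runs and runs[-1][0] == k:
--             runs[-1] = (k, runs[-1][1] + 1)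
--         else:
--             runs.append((k, 1))
--     counts = dict(runs)
--     return {k: counts[k] for k in dict.fromkeys(keys)}
-- ===== Notes on version B (the rewrite author's own statement) =====
-- stated objective: alternative
-- what changed: Replaces the running check-then-update dict with a sort-and-group pass: map the values to string keys once, sort the keys, run-length encode the sorted list, and emit (key, run length) in first-occurrence key order.
import Mathlib
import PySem

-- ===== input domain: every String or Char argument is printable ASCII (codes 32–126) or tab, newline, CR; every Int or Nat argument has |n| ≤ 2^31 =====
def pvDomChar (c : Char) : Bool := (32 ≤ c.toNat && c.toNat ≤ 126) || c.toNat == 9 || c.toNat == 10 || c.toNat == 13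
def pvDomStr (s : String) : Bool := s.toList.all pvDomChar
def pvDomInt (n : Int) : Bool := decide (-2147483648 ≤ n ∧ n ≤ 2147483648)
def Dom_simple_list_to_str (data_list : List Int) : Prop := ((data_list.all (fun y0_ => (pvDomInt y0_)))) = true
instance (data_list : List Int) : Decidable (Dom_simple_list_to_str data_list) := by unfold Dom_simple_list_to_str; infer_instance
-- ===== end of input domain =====

-- ===== PORT A =====
-- A: scans the list once maintaining a running dict of counts keyed by str(value).
def simple_list_to_str (data_list : List Int) : List (String × Int) :=
  (data_list.foldl (fun result value =>
      if result.contains (PySem.Int.toStr value) = false then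
        result.insert (PySem.Int.toStr value) 1
      else
        result.insert (PySem.Int.toStr value) (result.getD (PySem.Int.toStr value) 0 + 1))
    PySem.Dict.empty).items

-- ===== PORT B =====
-- B (alternative, sort-and-group; same return value): map the values to string keys once, sort
-- the keys, run-length encode the sorted list, then emit (key, run length) in first-occurrence
-- key order.  'runs[-1] = …' is ported as dropLast ++ [·] (exact: runs is nonempty in that branch);
-- 'counts[k]' is ported with default 0 (exact: every k of keys occurs in runs, so no KeyError).
def runStep (runs : List (String × Int)) (k : String) : List (String × Int) :=
  match runs.getLast? with
  | some last => if last.1 == k then runs.dropLast ++ [(k, last.2 + 1)] else runs ++ [(k, 1)]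
  | none => runs ++ [(k, 1)]

def simple_list_to_str_alt (data_list : List Int) : List (String × Int) :=
  let keys := data_list.map PySem.Int.toStr
  let runs := (PySem.List.sorted keys (fun k => k) false).foldl runStep []
  let counts := PySem.Dict.ofList runs
  (PySem.List.dedup keys).map (fun k => (k, counts.getD k 0))

-- ===== PRECONDITION & SPEC =====
def Spec_simple_list_to_str (data_list : List Int) (out : List (String × Int)) : Prop := out = simple_list_to_str_alt data_list
instance (data_list : List Int) (out : List (String × Int)) : Decidable (Spec_simple_list_to_str data_list out) := by unfold Spec_simple_list_to_str; infer_instance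

-- ===== CLAIM (what is proved, stated in full; the proofs are below) =====
def Claim_equal_simple_list_to_str : Prop := ∀ (data_list : List Int), Dom_simple_list_to_str data_list → Spec_simple_list_to_str data_list (simple_list_to_str data_list)

-- ===== LEMMAS AND PROOFS =====

-- A-side: the loop body always stores getD+1 (in the fresh-key branch getD is 0), so the
-- fold is exactly the counter fold over the stringified keys.
lemma simple_list_to_str_body (result : PySem.Dict String Int) (k : String) :
    (if result.contains k = false then result.insert k 1
     else result.insert k (result.getD k 0 + 1))
    = result.insert k (result.getD k 0 + 1) := by
  by_cases h : result.contains k = false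
  · simp [PySem.Dict.getD_of_not_contains, h]
  · simp [h]

lemma pv_A_canon (data_list : List Int) :
    simple_list_to_str data_list
      = (PySem.List.dedup (data_list.map PySem.Int.toStr)).map
          (fun k => (k, ((data_list.map PySem.Int.toStr).count k : Int))) := by
  unfold simple_list_to_str
  have h1 : data_list.foldl (fun result value =>
      if result.contains (PySem.Int.toStr value) = false then
        result.insert (PySem.Int.toStr value) 1
      else
        result.insert (PySem.Int.toStr value) (result.getD (PySem.Int.toStr value) 0 + 1))
      PySem.Dict.empty
      = PySem.Dict.counter (data_list.map PySem.Int.toStr) := by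
    rw [← PySem.Dict.foldl_insert_getD_add_one_eq_counter, List.foldl_map]
    congr 1
    funext d v
    exact simple_list_to_str_body d (PySem.Int.toStr v)
  rw [h1, PySem.Dict.items_counter, PySem.List.dedup_eq_ofList]

-- B-side toolkit: ordered dedup of an appended element
lemma pv_dedup_append (l : List String) (a : String) :
    PySem.List.dedup (l ++ [a]) =
      if a ∈ l then PySem.List.dedup l else PySem.List.dedup l ++ [a] := by
  simp only [PySem.List.dedup_eq_ofList, PySem.Set.ofList_append_singleton]
  unfold PySem.Set.add
  by_cases h : a ∈ l
  · simp [h]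
  · simp [h]

lemma pv_dedup_sublist (l : List String) : (PySem.List.dedup l).Sublist l := by
  induction l using List.reverseRecOn with
  | nil => simp [PySem.List.dedup_eq_ofList]
  | append_singleton l a ih =>
    rw [pv_dedup_append]
    by_cases h : a ∈ l
    · simpa [h] using ih.trans (List.sublist_append_left l [a])
    · simpa [h] using ih.append (List.Sublist.refl [a])

lemma pv_dedup_pairwise_lt (l : List String) (h : l.Pairwise (· ≤ ·)) :
    (PySem.List.dedup l).Pairwise (· < ·) := by
  have h1 : (PySem.List.dedup l).Pairwise (· ≤ ·) := h.sublist (pv_dedup_sublist l)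
  have h2 : (PySem.List.dedup l).Pairwise (· ≠ ·) := PySem.List.nodup_dedup l
  exact (h1.and h2).imp (fun hab => lt_of_le_of_ne hab.1 hab.2)

-- in a strictly increasing list the last element is the (unique) maximum
lemma pv_getLast_eq_max (l : List String) (h : l ≠ []) (a : String)
    (hp : l.Pairwise (· < ·)) (ha : a ∈ l) (hmax : ∀ x ∈ l, x ≤ a) :
    l.getLast h = a := by
  induction l with
  | nil => simp at h
  | cons x t ih =>
    cases t with
    | nil =>
      have : a = x := by simpa using ha
      simp [this]
    | cons y t' =>
      have hxlt : ∀ z ∈ y :: t', x < z := (List.pairwise_cons.1 hp).1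
      have hax : a ≠ x := by
        intro e
        exact absurd (hmax y (by simp)) (not_le.2 (e ▸ hxlt y (by simp)))
      have ha' : a ∈ y :: t' := by
        rcases List.mem_cons.1 ha with e | h'
        · exact absurd e hax
        · exact h'
      rw [List.getLast_cons (by simp)]
      exact ih (by simp) (List.pairwise_cons.1 hp).2 ha'
        (fun z hz => hmax z (List.mem_cons_of_mem _ hz))

-- run-length encoding of a (weakly) sorted list: one run per distinct key, of length count
lemma pv_runs_eq (l : List String) (h : l.Pairwise (· ≤ ·)) :
    l.foldl runStep [] =
      (PySem.List.dedup l).map (fun k => (k, (l.count k : Int))) := by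
  induction l using List.reverseRecOn with
  | nil => rfl
  | append_singleton l a ih =>
    have hsplit := List.pairwise_append.1 h
    have hl : l.Pairwise (· ≤ ·) := hsplit.1
    have hall : ∀ x ∈ l, x ≤ a := fun x hx => hsplit.2.2 x hx a (by simp)
    rw [List.foldl_append, ih hl]
    by_cases hmem : a ∈ l
    · -- the new element extends the last run
      have haD : a ∈ PySem.List.dedup l := (PySem.List.mem_dedup l a).2 hmem
      have hD : PySem.List.dedup l ≠ [] := List.ne_nil_of_mem haD
      have hlast : (PySem.List.dedup l).getLast hD = a :=
        pv_getLast_eq_max _ hD a (pv_dedup_pairwise_lt l hl) haD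
          (fun x hx => hall x ((PySem.List.mem_dedup l x).1 hx))
      have hlast? : (PySem.List.dedup l).getLast? = some a := by
        have := List.getLast?_eq_some_getLast (h := hD)
        rw [hlast] at this
        exact this
      have hstep : List.foldl runStep
          ((PySem.List.dedup l).map (fun k => (k, (l.count k : Int)))) [a]
          = ((PySem.List.dedup l).map (fun k => (k, (l.count k : Int)))).dropLast
              ++ [(a, (l.count a : Int) + 1)] := by
        simp only [List.foldl_cons, List.foldl_nil]
        unfold runStep
        rw [List.getLast?_map, hlast?]
        simp
      rw [hstep, pv_dedup_append]
      simp only [hmem, if_true]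
      -- rewrite the RHS using dedup l = dropLast ++ [a]
      have hnd : (PySem.List.dedup l).Pairwise (· ≠ ·) := PySem.List.nodup_dedup l
      have hdecomp : (PySem.List.dedup l).dropLast ++ [a] = PySem.List.dedup l := by
        conv_rhs => rw [← List.dropLast_append_getLast hD, hlast]
      have hne : ∀ x ∈ (PySem.List.dedup l).dropLast, x ≠ a := by
        intro x hx
        have := hdecomp ▸ hnd
        exact (List.pairwise_append.1 this).2.2 x hx a (by simp)
      conv_rhs => rw [← hdecomp]
      rw [List.map_append, ← List.map_dropLast]
      congr 1
      · exact List.map_congr_left (fun x hx => by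
          simp [List.count_append, (hne x hx).symm])
      · simp [List.count_append]
    · -- the new element starts a fresh run
      have hstep : List.foldl runStep
          ((PySem.List.dedup l).map (fun k => (k, (l.count k : Int)))) [a]
          = ((PySem.List.dedup l).map (fun k => (k, (l.count k : Int))))
              ++ [(a, 1)] := by
        simp only [List.foldl_cons, List.foldl_nil]
        unfold runStep
        rw [List.getLast?_map]
        cases hD : (PySem.List.dedup l).getLast? with
        | none => simp
        | some k0 =>
          have hk0 : k0 ∈ l :=
            (PySem.List.mem_dedup l k0).1 (List.mem_of_getLast? hD)
          have : k0 ≠ a := fun e => hmem (e ▸ hk0)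
          simp [this]
      rw [hstep, pv_dedup_append]
      simp only [hmem, if_false]
      rw [List.map_append]
      congr 1
      · exact (List.map_congr_left (fun x hx => by
          have hxa : x ≠ a := fun e =>
            hmem (e ▸ (PySem.List.mem_dedup l x).1 hx)
          simp [List.count_append, hxa.symm])).symm
      · have : a ∉ l := hmem
        simp [List.count_append, List.count_eq_zero_of_not_mem this]

-- dict(runs) lookup: with pairwise-distinct first components, ofList keeps the pairs as items
lemma pv_getD_ofList (ps : List (String × Int)) (hnd : (ps.map Prod.fst).Nodup)
    (k : String) (v : Int) (hmem : (k, v) ∈ ps) :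
    (PySem.Dict.ofList ps).getD k 0 = v := by
  have hitems : (PySem.Dict.ofList ps).items = ps := by
    show (List.foldl (fun acc p => acc.insert p.1 p.2) PySem.Dict.empty ps).items = ps
    have := PySem.Dict.items_foldl_insert_fresh ps Prod.fst Prod.snd PySem.Dict.empty
      (fun a _ => PySem.Dict.contains_empty _) hnd
    simpa using this
  have hkeys : (PySem.Dict.ofList ps).keys.Nodup := PySem.Dict.nodup_keys_ofList ps
  have hget := PySem.Dict.get?_of_mem_items (PySem.Dict.ofList ps)
    (hitems ▸ hmem) hkeys
  simp [PySem.Dict.getD, hget]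

-- ===== VERDICT (by name: the statement is the Claim_ definition above) =====
theorem simple_list_to_str_spec : Claim_equal_simple_list_to_str := by
  intro data_list _
  unfold Spec_simple_list_to_str
  rw [pv_A_canon]
  unfold simple_list_to_str_alt
  simp only []
  set keys := data_list.map PySem.Int.toStr with hkeys
  set srt := PySem.List.sorted keys (fun k => k) false with hsrt
  have hperm : srt.Perm keys := PySem.List.sorted_perm keys (fun k => k) false
  have hpw : srt.Pairwise (· ≤ ·) := PySem.List.sorted_pairwise keys (fun k => k)
  have hruns : srt.foldl runStep [] =
      (PySem.List.dedup srt).map (fun k => (k, (srt.count k : Int))) := pv_runs_eq srt hpw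
  rw [hruns]
  apply List.map_congr_left
  intro k hk
  have hkkeys : k ∈ keys := (PySem.List.mem_dedup keys k).1 hk
  have hksrt : k ∈ PySem.List.dedup srt :=
    (PySem.List.mem_dedup srt k).2 (hperm.mem_iff.2 hkkeys)
  have hnd : (((PySem.List.dedup srt).map
      (fun k => (k, (srt.count k : Int)))).map Prod.fst).Nodup := by
    rw [List.map_map]
    have h0 : (Prod.fst ∘ fun k => (k, (srt.count k : Int))) = fun k => k := rfl
    rw [h0, List.map_id']
    exact PySem.List.nodup_dedup srt
  have hlook := pv_getD_ofList _ hnd k (srt.count k : Int)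
    (List.mem_map_of_mem hksrt)
  rw [hlook, hperm.count_eq]
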